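-- pv_equiv track=rewrite | github.com/DelaneySteve/APAQ | data/stats/flight_stats.py | count_flights
-- ===== SOURCE A (Python) =====
-- def count_flights(set: list) -> dict:
--   total = len(set)
--   departures = 0
--   arrivals = 0
--   if total != 0:
--     airport = set[0]["origin_iata"]
--
--     for i in set:
--       if i["origin_iata"] == airport:
--         departures = departures + 1
--       else:
--         arrivals = arrivals + 1
--   else:
--     total = None
--     arrivals = None
--     departures = None
--   flight_data = {"arrivals": arrivals, "departures": departures, "total": total}
--   return flight_data
-- ===== SOURCE B (Python) =====
-- def count_flights(set: list) -> dict: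
--   # Build a frequency table of origin airports in one grouping pass,
--   # then read off the counts by lookup.
--   counts = {}
--   for i in set:
--     k = i["origin_iata"]
--     counts[k] = counts.get(k, 0) + 1
--   if not counts:
--     return {"arrivals": None, "departures": None, "total": None}
--   total = len(set)
--   departures = counts[set[0]["origin_iata"]]
--   return {"arrivals": total - departures, "departures": departures, "total": total}
-- ===== Notes on version B (the rewrite author's own statement) =====
-- stated objective: alternative
-- what changed: B builds a frequency dictionary of origin_iata values in one grouping pass and then obtains departures by a dict lookup of the first flight's origin and arrivals by subtraction, instead of A's loop that compares every element to the first and maintains two branching counters.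
import Mathlib
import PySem

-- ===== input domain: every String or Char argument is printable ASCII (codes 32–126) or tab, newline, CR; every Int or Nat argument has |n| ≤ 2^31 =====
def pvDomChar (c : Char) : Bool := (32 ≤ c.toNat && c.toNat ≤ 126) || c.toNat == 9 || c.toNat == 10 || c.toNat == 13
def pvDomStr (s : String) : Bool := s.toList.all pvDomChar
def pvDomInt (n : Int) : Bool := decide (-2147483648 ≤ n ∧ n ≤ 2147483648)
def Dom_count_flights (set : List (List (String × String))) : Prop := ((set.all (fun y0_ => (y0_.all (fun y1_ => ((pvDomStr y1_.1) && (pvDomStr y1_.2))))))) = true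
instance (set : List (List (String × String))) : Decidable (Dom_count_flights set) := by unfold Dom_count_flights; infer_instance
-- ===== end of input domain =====

-- B builds a frequency dictionary of origin airports in one grouping pass, then gets departures by lookup and arrivals by subtraction; alternative data-structure decomposition, same O(n) cost.


-- shared helper: Python dict lookup d[k] on the association-list encoding (first match; none = KeyError)
def pyLookup (d : List (String × String)) (k : String) : Option String :=
  (d.find? (fun p => p.1 == k)).map (·.2)

-- ===== PORT A =====
def count_flights (set : List (List (String × String))) : List (String × Option Int) :=
  let total : Int := set.length
  if total ≠ 0 then
    -- set[0]["origin_iata"]; under Pre_ the lookup is some (Python raises otherwise)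
    let airport : String := (pyLookup (set.headD []) "origin_iata").getD ""
    let da : Int × Int := set.foldl
      (fun (p : Int × Int) i =>
        if pyLookup i "origin_iata" == some airport then (p.1 + 1, p.2) else (p.1, p.2 + 1))
      (0, 0)
    [("arrivals", some da.2), ("departures", some da.1), ("total", some total)]
  else
    [("arrivals", none), ("departures", none), ("total", none)]

-- ===== PORT B =====
def count_flights_alt (set : List (List (String × String))) : List (String × Option Int) :=
  -- counts[k] = counts.get(k, 0) + 1 over the origin_iata of every flight
  let counts : PySem.Dict String Int :=
    set.foldl
      (fun d i =>
        let k : String := (pyLookup i "origin_iata").getD ""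
        d.insert k (d.getD k 0 + 1))
      PySem.Dict.empty
  if counts.size = 0 then
    [("arrivals", none), ("departures", none), ("total", none)]
  else
    let total : Int := set.length
    -- counts[set[0]["origin_iata"]]; the key is present by construction
    let departures : Int := (counts.get? ((pyLookup (set.headD []) "origin_iata").getD "")).getD 0
    [("arrivals", some (total - departures)), ("departures", some departures), ("total", some total)]

-- ===== PRECONDITION & SPEC =====
-- Pre_ excludes exactly the inputs where Python A raises KeyError: a list containing a dict without the "origin_iata" key.
def Pre_count_flights (set : List (List (String × String))) : Prop :=
  (set.all (fun d => d.any (fun p => p.1 == "origin_iata"))) = true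
instance (set : List (List (String × String))) : Decidable (Pre_count_flights set) := by
  unfold Pre_count_flights; infer_instance
def pvWitness_count_flights : (List (List (String × String))) :=
  [[("origin_iata", "LHR")], [("origin_iata", "JFK")]]
def Spec_count_flights (set : List (List (String × String))) (out : List (String × Option Int)) : Prop := out = count_flights_alt set
instance (set : List (List (String × String))) (out : List (String × Option Int)) : Decidable (Spec_count_flights set out) := by unfold Spec_count_flights; infer_instance

-- ===== CLAIM =====
def Claim_equal_count_flights : Prop := ∀ (set : List (List (String × String))), Dom_count_flights set → Pre_count_flights set → Spec_count_flights set (count_flights set)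

-- ===== LEMMAS AND PROOFS =====

-- A's two-counter loop computes (countP p, countP ¬p), accumulator generalized.
theorem fold_two_counters (p : List (String × String) → Bool)
    (l : List (List (String × String))) (a b : Int) :
    l.foldl (fun (q : Int × Int) i => if p i then (q.1 + 1, q.2) else (q.1, q.2 + 1)) (a, b)
      = (a + l.countP p, b + l.countP (fun i => !p i)) := by
  induction l generalizing a b with
  | nil => simp
  | cons x xs ih =>
    by_cases h : p x = true <;> simp [List.foldl, h, ih] <;> ring_nf

theorem countP_add_countP_not (p : List (String × String) → Bool)
    (l : List (List (String × String))) :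
    l.countP p + l.countP (fun i => !p i) = l.length := by
  induction l with
  | nil => simp
  | cons x xs ih =>
    by_cases h : p x = true <;> simp [h, ← ih] <;> omega

-- B's grouping fold is Counter over the mapped keys.
theorem counts_eq_counter (set : List (List (String × String))) :
    set.foldl
      (fun (d : PySem.Dict String Int) i =>
        let k : String := (pyLookup i "origin_iata").getD ""
        d.insert k (d.getD k 0 + 1))
      PySem.Dict.empty
    = PySem.Dict.counter (set.map (fun i => (pyLookup i "origin_iata").getD "")) := by
  rw [← PySem.Dict.foldl_insert_getD_add_one_eq_counter, List.foldl_map]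

-- ===== VERDICT =====
theorem count_flights_spec : Claim_equal_count_flights := by
  intro set _ hpre
  unfold Spec_count_flights count_flights count_flights_alt
  simp only [counts_eq_counter]
  cases set with
  | nil => simp [PySem.Dict.counter]
  | cons d0 rest =>
    have hlen : (((d0 :: rest).length : Int)) ≠ 0 := by
      simp only [List.length_cons]; push_cast; omega
    set key : List (String × String) → String := fun i => (pyLookup i "origin_iata").getD "" with hk
    have hsz : (PySem.Dict.counter ((d0 :: rest).map key)).size ≠ 0 := by
      have : key d0 ∈ (PySem.Dict.counter ((d0 :: rest).map key)).keys := by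
        rw [PySem.Dict.keys_counter]
        simp [PySem.Set.mem_ofList]
      intro h
      simp only [PySem.Dict.size] at h
      have hitems := List.length_eq_zero_iff.mp h
      rw [PySem.Dict.keys, hitems] at this
      simp at this
    rw [if_pos hlen, if_neg hsz]
    -- departures on B's side
    have hB : ((PySem.Dict.counter ((d0 :: rest).map key)).get?
        ((pyLookup ((d0 :: rest).headD []) "origin_iata").getD "")).getD 0
        = (d0 :: rest).countP (fun i => pyLookup i "origin_iata" == some (key d0)) := by
      rw [← PySem.Dict.getD_eq_get?_getD, PySem.Dict.getD_counter]
      simp only [List.headD_cons]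
      rw [List.count_eq_countP, List.countP_map]
      norm_cast
      apply List.countP_congr
      intro i hi
      have : (fun d => d.any (fun p => p.1 == "origin_iata")) i = true :=
        List.all_eq_true.mp hpre i hi
      obtain ⟨p, hp, hpe⟩ := List.any_eq_true.mp this
      have hfind : (pyLookup i "origin_iata").isSome := by
        simp only [pyLookup, Option.isSome_map]
        rw [List.find?_isSome]
        exact ⟨p, hp, hpe⟩
      obtain ⟨s, hs⟩ := Option.isSome_iff_exists.mp hfind
      simp only [Function.comp, hk, hs, Option.getD_some]
      constructor
      · intro h; simp_all
      · intro h; simp_all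
    rw [hB, fold_two_counters]
    have hcnt := countP_add_countP_not
      (fun i => pyLookup i "origin_iata" == some (key d0)) (d0 :: rest)
    simp only [List.headD_cons, zero_add, List.cons.injEq, Prod.mk.injEq,
      Option.some.injEq, true_and, and_true]
    refine ⟨?_, rfl⟩
    simp only [hk, List.length_cons] at hcnt ⊢
    omega
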